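-- pv_equiv track=rewrite | github.com/dobelinn/aoc-2024 | python/main.py | encontrar_sequencia_valida
-- ===== SOURCE A (Python) =====
-- def verificar_seq_crescente(vetor):
--     is_next_pos_crescente = True
--     for index in range(len(vetor) - 1):
--         item = vetor[index]
--         for i in range(1,4):
--             if (item+i) == vetor[(index+1)]:
--                 is_next_pos_crescente = True
--                 break
--             else:
--                 is_next_pos_crescente = False
--         if index == (len(vetor) - 2):
--             return is_next_pos_crescente
--         if is_next_pos_crescente:
--             continue
--         else:
--             return is_next_pos_crescente
--
-- def verificar_seq_decrescente(vetor):
--     is_next_pos_decrescente = True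
--     for index in range(len(vetor) - 1):
--         item = vetor[index]
--         for i in range(1,4):
--             if (item-i) == vetor[(index+1)]:
--                 is_next_pos_decrescente = True
--                 break
--             else:
--                 is_next_pos_decrescente = False
--         if index == (len(vetor) - 2):
--             return is_next_pos_decrescente
--         if is_next_pos_decrescente:
--             continue
--         else:
--             return is_next_pos_decrescente
--
-- def encontrar_sequencia_valida(vetor):
--     if verificar_seq_crescente(vetor) or verificar_seq_decrescente(vetor):
--         return vetor
--
--     for i in range(len(vetor)):
--         novo_vetor = vetor[:i] + vetor[i + 1:]
--         if verificar_seq_crescente(novo_vetor) or verificar_seq_decrescente(novo_vetor):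
--             return novo_vetor
--
--     return None
-- ===== SOURCE B (Python) =====
-- def encontrar_sequencia_valida(vetor):
--     n = len(vetor)
--     diffs = [vetor[k + 1] - vetor[k] for k in range(n - 1)]
--
--     def valid_whole(lo, hi):
--         return n >= 2 and all(lo <= d <= hi for d in diffs)
--
--     if valid_whole(1, 3) or valid_whole(-3, -1):
--         return vetor
--
--     if n >= 3:
--         def tables(lo, hi):
--             pre = [True] * n
--             for k in range(n - 1):
--                 pre[k + 1] = pre[k] and (lo <= diffs[k] <= hi)
--             suf = [True] * n
--             for k in range(n - 2, -1, -1):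
--                 suf[k] = suf[k + 1] and (lo <= diffs[k] <= hi)
--             return pre, suf
--
--         pre_i, suf_i = tables(1, 3)
--         pre_d, suf_d = tables(-3, -1)
--
--         def removal_ok(i, pre, suf, lo, hi):
--             left = pre[i - 1] if i >= 1 else True
--             right = suf[i + 1] if i + 1 <= n - 1 else True
--             mid = (lo <= vetor[i + 1] - vetor[i - 1] <= hi) if 0 < i < n - 1 else True
--             return left and mid and right
--
--         for i in range(n):
--             if removal_ok(i, pre_i, suf_i, 1, 3) or removal_ok(i, pre_d, suf_d, -3, -1):
--                 return vetor[:i] + vetor[i + 1:]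
--     return None
-- ===== Notes on version B (the rewrite author's own statement) =====
-- stated objective: faster
-- what changed: Instead of re-validating every one-element-removed copy from scratch (O(n) per removal, O(n^2) total), B computes the adjacent-difference list once and prefix/suffix all-valid tables per direction, so each removal is tested in O(1) (left pairs, merged pair, right pairs), returning the first valid splice.
import Mathlib
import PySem

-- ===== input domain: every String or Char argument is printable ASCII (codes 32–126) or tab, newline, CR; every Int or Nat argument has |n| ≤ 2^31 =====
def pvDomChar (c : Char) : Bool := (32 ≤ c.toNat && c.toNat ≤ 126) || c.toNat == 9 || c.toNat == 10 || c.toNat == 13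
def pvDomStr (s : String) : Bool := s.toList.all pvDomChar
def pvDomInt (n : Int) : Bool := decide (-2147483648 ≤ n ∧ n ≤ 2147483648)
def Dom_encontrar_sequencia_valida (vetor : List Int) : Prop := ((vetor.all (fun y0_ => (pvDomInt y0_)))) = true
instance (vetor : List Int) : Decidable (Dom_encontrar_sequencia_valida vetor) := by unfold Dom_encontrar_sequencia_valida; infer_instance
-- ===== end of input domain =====

-- B replaces A's O(n) re-validation of every one-element-removed copy by one adjacent-difference
-- pass with prefix/suffix validity tables, testing each removal in O(1) (objective: faster).

-- ===== PORT A =====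
-- Python truthiness of the Option Bool that verificar_* returns (None and False are falsy)
def pvTruthy (o : Option Bool) : Bool :=
  match o with
  | some b => b
  | none => false

-- inner 'for i in range(1,4): if item+i == nxt: flag=True; break else: flag=False'
def pvInnerC (item nxt : Int) (is_ : List Int) (flag : Bool) : Bool :=
  match is_ with
  | [] => flag
  | i :: rest => if item + i = nxt then true else pvInnerC item nxt rest false

-- same with 'item - i'
def pvInnerD (item nxt : Int) (is_ : List Int) (flag : Bool) : Bool :=
  match is_ with
  | [] => flag
  | i :: rest => if item - i = nxt then true else pvInnerD item nxt rest false

-- the shared outer-loop shape of verificar_seq_crescente / _decrescente (each passes its own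
-- inner loop); falls off the loop (list of indices empty) = Python returns None.
-- The '| _, _ => none' arm is unreachable: every index produced by range(len-1) is in range.
def pvVerifGo (inner : Int → Int → Bool → Bool) (v : List Int) (idxs : List Int) (flag : Bool) :
    Option Bool :=
  match idxs with
  | [] => none
  | index :: rest =>
    match PySem.List.pyGet? v index, PySem.List.pyGet? v (index + 1) with
    | some item, some nxt =>
      let f := inner item nxt flag
      if index = (v.length : Int) - 2 then some f
      else if f then pvVerifGo inner v rest f
      else some f
    | _, _ => none

def verificar_seq_crescente (vetor : List Int) : Option Bool :=
  pvVerifGo (fun item nxt flag => pvInnerC item nxt (PySem.List.pyRange 1 4 1) flag)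
    vetor (PySem.List.pyRange 0 ((vetor.length : Int) - 1) 1) true

def verificar_seq_decrescente (vetor : List Int) : Option Bool :=
  pvVerifGo (fun item nxt flag => pvInnerD item nxt (PySem.List.pyRange 1 4 1) flag)
    vetor (PySem.List.pyRange 0 ((vetor.length : Int) - 1) 1) true

-- 'for i in range(len(vetor)): novo = vetor[:i] + vetor[i+1:]; if …: return novo'
def pvEncGo (v : List Int) (idxs : List Int) : Option (List Int) :=
  match idxs with
  | [] => none
  | i :: rest =>
    let novo := PySem.List.slice v none (some i) ++ PySem.List.slice v (some (i + 1)) none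
    if pvTruthy (verificar_seq_crescente novo) || pvTruthy (verificar_seq_decrescente novo) then
      some novo
    else pvEncGo v rest

def encontrar_sequencia_valida (vetor : List Int) : Option (List Int) :=
  if pvTruthy (verificar_seq_crescente vetor) || pvTruthy (verificar_seq_decrescente vetor) then
    some vetor
  else
    pvEncGo vetor (PySem.List.pyRange 0 (vetor.length : Int) 1)

-- ===== PORT B =====
-- lo <= d <= hi
def pvOk (lo hi d : Int) : Bool := decide (lo ≤ d) && decide (d ≤ hi)

-- diffs = [vetor[k+1] - vetor[k] for k in range(n-1)]
def pvDiffs (v : List Int) : List Int := List.zipWith (fun a b => a - b) (v.drop 1) v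

-- suf[k] = suf[k+1] and ok(diffs[k]), built back-to-front as in Source B's tables()
def pvSuf (lo hi : Int) : List Int → List Bool
  | [] => [true]
  | d :: ds =>
    let s := pvSuf lo hi ds
    (pvOk lo hi d && s.headD true) :: s

-- removal_ok(i, pre, suf, lo, hi)
def pvRemOk (v : List Int) (n : Nat) (pre suf : List Bool) (lo hi : Int) (i : Nat) : Bool :=
  let left := if 1 ≤ i then pre.getD (i - 1) true else true
  let right := if i + 1 ≤ n - 1 then suf.getD (i + 1) true else true
  let mid :=
    if 0 < i ∧ i < n - 1 then pvOk lo hi (v.getD (i + 1) 0 - v.getD (i - 1) 0) else true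
  left && mid && right

-- 'for i in range(n): if removal_ok(i, …) or removal_ok(i, …): return vetor[:i] + vetor[i+1:]'
def pvFindRem (v : List Int) (n : Nat) (preI sufI preD sufD : List Bool) :
    List Nat → Option (List Int)
  | [] => none
  | i :: rest =>
    if pvRemOk v n preI sufI 1 3 i || pvRemOk v n preD sufD (-3) (-1) i then
      some (v.take i ++ v.drop (i + 1))
    else pvFindRem v n preI sufI preD sufD rest

def encontrar_sequencia_valida_alt (vetor : List Int) : Option (List Int) :=
  let n := vetor.length
  let diffs := pvDiffs vetor
  if (decide (2 ≤ n) && diffs.all (pvOk 1 3)) ||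
      (decide (2 ≤ n) && diffs.all (pvOk (-3) (-1))) then
    some vetor
  else if 3 ≤ n then
    let preI := diffs.scanl (fun acc d => acc && pvOk 1 3 d) true
    let sufI := pvSuf 1 3 diffs
    let preD := diffs.scanl (fun acc d => acc && pvOk (-3) (-1) d) true
    let sufD := pvSuf (-3) (-1) diffs
    pvFindRem vetor n preI sufI preD sufD (List.range n)
  else none

-- ===== PRECONDITION & SPEC =====
def Spec_encontrar_sequencia_valida (vetor : List Int) (out : Option (List Int)) : Prop := out = encontrar_sequencia_valida_alt vetor
instance (vetor : List Int) (out : Option (List Int)) : Decidable (Spec_encontrar_sequencia_valida vetor out) := by unfold Spec_encontrar_sequencia_valida; infer_instance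

-- ===== CLAIM (what is proved, stated in full; the proofs are below) =====
def Claim_equal_encontrar_sequencia_valida : Prop := ∀ (vetor : List Int), Dom_encontrar_sequencia_valida vetor → Spec_encontrar_sequencia_valida vetor (encontrar_sequencia_valida vetor)

-- ===== LEMMAS AND PROOFS =====

-- proof-side characterisation: all adjacent differences in [lo,hi]
def pvChain (lo hi : Int) : List Int → Bool
  | [] => true
  | [_] => true
  | a :: b :: t => pvOk lo hi (b - a) && pvChain lo hi (b :: t)

theorem pvInnerC_eq (item nxt : Int) (f : Bool) :
    pvInnerC item nxt (PySem.List.pyRange 1 4 1) f = pvOk 1 3 (nxt - item) := by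
  have h : PySem.List.pyRange 1 4 1 = [1, 2, 3] := by decide
  rw [h]
  simp only [pvInnerC, pvOk]
  split_ifs with h1 h2 h3 <;> simp <;> omega

theorem pvInnerD_eq (item nxt : Int) (f : Bool) :
    pvInnerD item nxt (PySem.List.pyRange 1 4 1) f = pvOk (-3) (-1) (nxt - item) := by
  have h : PySem.List.pyRange 1 4 1 = [1, 2, 3] := by decide
  rw [h]
  simp only [pvInnerD, pvOk]
  split_ifs with h1 h2 h3 <;> simp <;> omega

theorem pvChain_eq_all (lo hi : Int) (v : List Int) :
    pvChain lo hi v = (pvDiffs v).all (pvOk lo hi) := by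
  induction v with
  | nil => rfl
  | cons a t ih =>
    cases t with
    | nil => rfl
    | cons b u =>
      simp only [pvChain, pvDiffs, List.drop_one, List.tail_cons, List.zipWith_cons_cons,
        List.all_cons] at *
      rw [ih]

theorem pvVerifGo_eq (inner : Int → Int → Bool → Bool) (lo hi : Int)
    (hinner : ∀ a b f, inner a b f = pvOk lo hi (b - a))
    (v : List Int) (j : Nat) (hj : j + 2 ≤ v.length) (flag : Bool) :
    pvVerifGo inner v (PySem.List.pyRange (j : Int) ((v.length : Int) - 1) 1) flag =
      some (pvChain lo hi (v.drop j)) := by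
  suffices H : ∀ (m j : Nat) (flag : Bool), j + 2 ≤ v.length → v.length - j ≤ m →
      pvVerifGo inner v (PySem.List.pyRange (j : Int) ((v.length : Int) - 1) 1) flag =
        some (pvChain lo hi (v.drop j)) by
    exact H v.length j flag hj (by omega)
  intro m
  induction m with
  | zero => intro j flag h1 h2; omega
  | succ m ih =>
    intro j flag h1 h2
    have hjlt : (j : Int) < (v.length : Int) - 1 := by omega
    rw [PySem.List.pyRange_one_cons hjlt]
    have hj1 : j < v.length := by omega
    have hj2 : j + 1 < v.length := by omega
    have hg1 : PySem.List.pyGet? v (j : Int) = some v[j] := by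
      rw [PySem.List.pyGet?_natCast]
      exact List.getElem?_eq_getElem hj1
    have hg2 : PySem.List.pyGet? v ((j : Int) + 1) = some v[j + 1] := by
      rw [show ((j : Int) + 1) = ((j + 1 : Nat) : Int) by push_cast; ring,
        PySem.List.pyGet?_natCast]
      exact List.getElem?_eq_getElem hj2
    have hdropj : v.drop j = v[j] :: v.drop (j + 1) := List.drop_eq_getElem_cons hj1
    have hdropj1 : v.drop (j + 1) = v[j + 1] :: v.drop (j + 2) := List.drop_eq_getElem_cons hj2
    have hchain : pvChain lo hi (v.drop j) =
        (pvOk lo hi (v[j + 1] - v[j]) && pvChain lo hi (v.drop (j + 1))) := by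
      rw [hdropj, hdropj1, pvChain, ← hdropj1]
    simp only [pvVerifGo, hg1, hg2, hinner]
    by_cases hlast : (j : Int) = (v.length : Int) - 2
    · rw [if_pos hlast, hchain]
      have hj2e : j + 2 = v.length := by omega
      have : v.drop (j + 1) = [v[j + 1]] := by
        rw [hdropj1, List.drop_of_length_le (by omega)]
      rw [this, pvChain]
      simp
    · rw [if_neg hlast]
      have hlt : j + 2 < v.length := by
        rcases lt_or_eq_of_le h1 with h | h
        · omega
        · exact absurd (by omega : (j : Int) = (v.length : Int) - 2) hlast
      by_cases hf : pvOk lo hi (v[j + 1] - v[j]) = true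
      · rw [if_pos hf, show ((j : Int) + 1) = ((j + 1 : Nat) : Int) by push_cast; ring,
          ih (j + 1) _ (by omega) (by omega), hchain, hf]
        simp
      · rw [if_neg hf, hchain, Bool.not_eq_true] at *
        rw [hf]
        simp

theorem pvTruthy_verifC (v : List Int) :
    pvTruthy (verificar_seq_crescente v) = (decide (2 ≤ v.length) && pvChain 1 3 v) := by
  unfold verificar_seq_crescente
  by_cases h : 2 ≤ v.length
  · rw [show (0 : Int) = ((0 : Nat) : Int) from rfl,
      pvVerifGo_eq _ 1 3 (fun a b f => pvInnerC_eq a b f) v 0 (by omega) true]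
    simp [pvTruthy, h]
  · have hnil : PySem.List.pyRange 0 ((v.length : Int) - 1) 1 = [] :=
      PySem.List.pyRange_one_eq_nil (by omega)
    rw [hnil]
    simp [pvVerifGo, pvTruthy, h]

theorem pvTruthy_verifD (v : List Int) :
    pvTruthy (verificar_seq_decrescente v) = (decide (2 ≤ v.length) && pvChain (-3) (-1) v) := by
  unfold verificar_seq_decrescente
  by_cases h : 2 ≤ v.length
  · rw [show (0 : Int) = ((0 : Nat) : Int) from rfl,
      pvVerifGo_eq _ (-3) (-1) (fun a b f => pvInnerD_eq a b f) v 0 (by omega) true]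
    simp [pvTruthy, h]
  · have hnil : PySem.List.pyRange 0 ((v.length : Int) - 1) 1 = [] :=
      PySem.List.pyRange_one_eq_nil (by omega)
    rw [hnil]
    simp [pvVerifGo, pvTruthy, h]

-- prefix table: entry k is 'all of (take k diffs) ok'
theorem pvScanl_getD (lo hi : Int) (ds : List Int) (b : Bool) (k : Nat) (hk : k ≤ ds.length) :
    (ds.scanl (fun acc d => acc && pvOk lo hi d) b).getD k true =
      (b && (ds.take k).all (pvOk lo hi)) := by
  induction ds generalizing k b with
  | nil =>
    have : k = 0 := by simpa using hk
    subst this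
    simp [List.scanl_nil]
  | cons d t ih =>
    cases k with
    | zero => simp [List.scanl_cons]
    | succ k =>
      rw [List.scanl_cons]
      simp only [List.getD_cons_succ, List.take_succ_cons, List.all_cons]
      rw [ih _ _ (by simpa using hk)]
      simp [Bool.and_assoc]

-- suffix table: entry k is 'all of (drop k diffs) ok' (out of range: both sides true)
theorem pvSuf_getD (lo hi : Int) (ds : List Int) (k : Nat) :
    (pvSuf lo hi ds).getD k true = (ds.drop k).all (pvOk lo hi) := by
  induction ds generalizing k with
  | nil => cases k <;> simp [pvSuf]
  | cons d t ih =>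
    cases k with
    | zero =>
      have h0 := ih 0
      simp only [pvSuf, List.getD_cons_zero, List.drop_zero, List.all_cons]
      cases ht : pvSuf lo hi t with
      | nil => cases t <;> simp [pvSuf] at ht
      | cons x s => simp [ht] at h0 ⊢; rw [h0]
    | succ k =>
      simp only [pvSuf, List.getD_cons_succ]
      exact ih k

theorem pvDiffs_nil : pvDiffs [] = [] := rfl

theorem pvDiffs_single (a : Int) : pvDiffs [a] = [] := rfl

theorem pvDiffs_cons_cons (a b : Int) (t : List Int) :
    pvDiffs (a :: b :: t) = (b - a) :: pvDiffs (b :: t) := rfl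

theorem pvDiffs_tail (v : List Int) : pvDiffs v.tail = (pvDiffs v).tail := by
  match v with
  | [] => rfl
  | [a] => rfl
  | a :: b :: t => simp [pvDiffs_cons_cons]

theorem pvDiffs_drop (v : List Int) (k : Nat) :
    pvDiffs (v.drop k) = (pvDiffs v).drop k := by
  induction k generalizing v with
  | zero => simp
  | succ k ih =>
    rw [List.drop_add_one_eq_tail_drop, pvDiffs_tail, ih, ← List.drop_add_one_eq_tail_drop]

theorem pvDiffs_take_succ (v : List Int) (j : Nat) :
    pvDiffs (v.take (j + 1)) = (pvDiffs v).take j := by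
  induction v generalizing j with
  | nil => simp [pvDiffs_nil]
  | cons a t ih =>
    cases j with
    | zero => simp [pvDiffs]
    | succ j =>
      cases t with
      | nil => simp [pvDiffs_single]
      | cons b u =>
        simp only [List.take_succ_cons]
        rw [pvDiffs_cons_cons, show (b :: List.take j u) = List.take (j + 1) (b :: u) from rfl,
          ih, pvDiffs_cons_cons, List.take_succ_cons]

theorem pvDiffs_take (v : List Int) (i : Nat) (hi : 1 ≤ i) :
    pvDiffs (v.take i) = (pvDiffs v).take (i - 1) := by
  obtain ⟨j, rfl⟩ : ∃ j, i = j + 1 := ⟨i - 1, by omega⟩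
  simpa using pvDiffs_take_succ v j

theorem pvDiffs_append (xs ys : List Int) (hx : xs ≠ []) (hy : ys ≠ []) :
    pvDiffs (xs ++ ys) =
      pvDiffs xs ++ (ys.head hy - xs.getLast hx) :: pvDiffs ys := by
  induction xs with
  | nil => exact absurd rfl hx
  | cons x xs ih =>
    cases xs with
    | nil =>
      cases ys with
      | nil => exact absurd rfl hy
      | cons y ys' => simp [pvDiffs_cons_cons, pvDiffs_single]
    | cons x2 xs' =>
      have h2 : (x2 :: xs') ≠ [] := by simp
      have e1 : (x :: x2 :: xs') ++ ys = x :: x2 :: (xs' ++ ys) := by simp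
      rw [e1, pvDiffs_cons_cons, pvDiffs_cons_cons,
        show x2 :: (xs' ++ ys) = (x2 :: xs') ++ ys from rfl, ih h2]
      simp [List.getLast_cons h2]

theorem pvDiffs_length (v : List Int) : (pvDiffs v).length = v.length - 1 := by
  simp [pvDiffs]

-- the O(1) removal test equals the chain test of the spliced list
theorem pvRemOk_eq (lo hi : Int) (v : List Int) (i : Nat) (h3 : 3 ≤ v.length)
    (hin : i < v.length) :
    pvRemOk v v.length (pvDiffs v |>.scanl (fun acc d => acc && pvOk lo hi d) true)
      (pvSuf lo hi (pvDiffs v)) lo hi i =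
      pvChain lo hi (v.take i ++ v.drop (i + 1)) := by
  have hD : (pvDiffs v).length = v.length - 1 := pvDiffs_length v
  rw [pvChain_eq_all]
  unfold pvRemOk
  rcases Nat.eq_zero_or_pos i with h0 | h1
  · subst h0
    rw [if_neg (by omega), if_pos (by omega), if_neg (by omega), pvSuf_getD,
      List.take_zero, List.nil_append, pvDiffs_drop]
    simp
  · by_cases hlast : i = v.length - 1
    · rw [if_pos (show 1 ≤ i by omega), if_neg (by omega), if_neg (by omega),
        pvScanl_getD _ _ _ _ _ (by omega),
        List.drop_of_length_le (by omega), List.append_nil,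
        pvDiffs_take v i h1]
      simp
    · have hmid : i < v.length - 1 := by omega
      have hxne : v.take i ≠ [] := by
        apply List.ne_nil_of_length_pos
        rw [List.length_take]
        omega
      have hyne : v.drop (i + 1) ≠ [] := by
        apply List.ne_nil_of_length_pos
        rw [List.length_drop]
        omega
      rw [if_pos (show 1 ≤ i by omega), if_pos (by omega), if_pos (by omega),
        pvScanl_getD _ _ _ _ _ (by omega), pvSuf_getD,
        pvDiffs_append _ _ hxne hyne, pvDiffs_take v i h1, pvDiffs_drop,
        List.all_append, List.all_cons]
      have hhead : (v.drop (i + 1)).head hyne = v[i + 1]'(by omega) := List.head_drop hyne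
      have hlastv : (v.take i).getLast hxne = v[i - 1]'(by omega) := by
        rw [List.getLast_eq_getElem]
        simp only [List.getElem_take]
        congr 1
        simp [List.length_take]
        omega
      rw [hhead, hlastv,
        List.getD_eq_getElem v 0 (by omega : i + 1 < v.length),
        List.getD_eq_getElem v 0 (by omega : i - 1 < v.length)]
      simp [Bool.and_assoc]

theorem pvEncGo_eq_findRem (v : List Int) (h3 : 3 ≤ v.length) (j : Nat) (hj : j ≤ v.length) :
    pvEncGo v (PySem.List.pyRange (j : Int) (v.length : Int) 1) =
      pvFindRem v v.length (pvDiffs v |>.scanl (fun acc d => acc && pvOk 1 3 d) true)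
        (pvSuf 1 3 (pvDiffs v))
        (pvDiffs v |>.scanl (fun acc d => acc && pvOk (-3) (-1) d) true)
        (pvSuf (-3) (-1) (pvDiffs v))
        (List.range' j (v.length - j)) := by
  suffices H : ∀ (m j : Nat), j ≤ v.length → v.length - j ≤ m →
      pvEncGo v (PySem.List.pyRange (j : Int) (v.length : Int) 1) =
        pvFindRem v v.length (pvDiffs v |>.scanl (fun acc d => acc && pvOk 1 3 d) true)
          (pvSuf 1 3 (pvDiffs v))
          (pvDiffs v |>.scanl (fun acc d => acc && pvOk (-3) (-1) d) true)
          (pvSuf (-3) (-1) (pvDiffs v))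
          (List.range' j (v.length - j)) by
    exact H v.length j hj (by omega)
  intro m
  induction m with
  | zero =>
    intro j h1 h2
    have hje : j = v.length := by omega
    subst hje
    rw [PySem.List.pyRange_one_eq_nil (by omega), Nat.sub_self]
    rfl
  | succ m ih =>
    intro j h1 h2
    rcases Nat.eq_or_lt_of_le h1 with he | hlt
    · subst he
      rw [PySem.List.pyRange_one_eq_nil (by omega), Nat.sub_self]
      rfl
    · have hjlt : (j : Int) < (v.length : Int) := by omega
      rw [PySem.List.pyRange_one_cons hjlt]
      rw [show v.length - j = (v.length - (j + 1)) + 1 by omega, List.range'_succ]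
      simp only [pvEncGo, pvFindRem]
      have hnovo : PySem.List.slice v none (some (j : Int)) ++
          PySem.List.slice v (some ((j : Int) + 1)) none = v.take j ++ v.drop (j + 1) := by
        rw [PySem.List.slice_to_natCast,
          show ((j : Int) + 1) = ((j + 1 : Nat) : Int) by push_cast; ring,
          PySem.List.slice_from_natCast]
      rw [hnovo]
      have hlen2 : 2 ≤ (v.take j ++ v.drop (j + 1)).length := by
        rw [List.length_append, List.length_take, List.length_drop]
        omega
      rw [pvTruthy_verifC, pvTruthy_verifD, decide_eq_true hlen2]
      rw [← pvRemOk_eq 1 3 v j h3 hlt, ← pvRemOk_eq (-3) (-1) v j h3 hlt]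
      simp only [Bool.true_and]
      by_cases hcond : (pvRemOk v v.length
          ((pvDiffs v).scanl (fun acc d => acc && pvOk 1 3 d) true)
          (pvSuf 1 3 (pvDiffs v)) 1 3 j ||
        pvRemOk v v.length
          ((pvDiffs v).scanl (fun acc d => acc && pvOk (-3) (-1) d) true)
          (pvSuf (-3) (-1) (pvDiffs v)) (-3) (-1) j) = true
      · rw [if_pos hcond, if_pos hcond]
      · rw [if_neg hcond, if_neg hcond,
          show ((j : Int) + 1) = ((j + 1 : Nat) : Int) by push_cast; ring,
          ih (j + 1) (by omega) (by omega)]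

theorem pvEncGo_none_of_short (v : List Int) (hn : v.length < 3) (idxs : List Int)
    (hidx : ∀ i ∈ idxs, 0 ≤ i ∧ i < (v.length : Int)) :
    pvEncGo v idxs = none := by
  induction idxs with
  | nil => rfl
  | cons i rest ih =>
    obtain ⟨h0, hlt⟩ := hidx i List.mem_cons_self
    simp only [pvEncGo]
    have hsl : PySem.List.slice v none (some i) ++ PySem.List.slice v (some (i + 1)) none =
        v.take i.toNat ++ v.drop (i + 1).toNat := by
      rw [PySem.List.slice_to v h0, PySem.List.slice_from v (by omega)]
    rw [hsl, pvTruthy_verifC, pvTruthy_verifD]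
    have hlen : ¬ 2 ≤ (v.take i.toNat ++ v.drop (i + 1).toNat).length := by
      rw [List.length_append, List.length_take, List.length_drop]
      omega
    rw [decide_eq_false hlen]
    simp only [Bool.false_and, Bool.or_self, Bool.false_eq_true, if_false]
    exact ih (fun x hx => hidx x (List.mem_cons_of_mem _ hx))

-- ===== VERDICT (by name: the statement is the Claim_ definition above) =====
theorem encontrar_sequencia_valida_spec : Claim_equal_encontrar_sequencia_valida := by
  unfold Claim_equal_encontrar_sequencia_valida
  intro v _
  unfold Spec_encontrar_sequencia_valida encontrar_sequencia_valida encontrar_sequencia_valida_alt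
  rw [pvTruthy_verifC, pvTruthy_verifD, pvChain_eq_all, pvChain_eq_all]
  by_cases hw : ((decide (2 ≤ v.length) && (pvDiffs v).all (pvOk 1 3)) ||
      (decide (2 ≤ v.length) && (pvDiffs v).all (pvOk (-3) (-1)))) = true
  · rw [if_pos hw, if_pos hw]
  · rw [if_neg hw, if_neg hw]
    by_cases h3 : 3 ≤ v.length
    · rw [if_pos h3, show (0 : Int) = ((0 : Nat) : Int) from rfl,
        pvEncGo_eq_findRem v h3 0 (by omega), List.range_eq_range', Nat.sub_zero]
    · rw [if_neg h3]
      apply pvEncGo_none_of_short v (by omega)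
      intro i hi
      rw [PySem.List.mem_pyRange_one] at hi
      exact hi
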